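-- pv_equiv track=rewrite | github.com/ferozferoz/learn_python | problems/hill_valley.py | solution
-- ===== SOURCE A (Python) =====
-- def solution(A):
--     # write your code in Python 3.6
--     number_hills = 0
--     number_valleys = 0
--     for index in range(0, len(A)):
--         if index == 0:
--             pass
--         else:
--             if A[index] > A[index - 1]:
--                 # also confirm if index-n is greater
--                 k = index - 1
--                 while A[k] == A[k - 1] and k > 0:
--                     k = k - 1
--
--                 if k == 0:
--                     number_valleys = number_valleys + 1
--                 else:
--                     if A[k] < A[k - 1]:
--                         number_valleys = number_valleys + 1
--
--             if A[index] < A[index - 1]: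
--
--                 k = index - 1
--                 while A[k] == A[k - 1] and k > 0:
--                     k = k - 1
--
--                 if k == 0:
--                     number_hills = number_hills + 1
--                 else:
--                     if A[k] > A[k - 1]:
--                         number_hills = number_hills + 1
--
--             if A[index] == A[index - 1]:
--                 pass
--
--     j = index
--     while A[j] == A[j - 1] and j > 0:
--         j = j - 1
--
--     if A[j] < A[j - 1]:
--         number_valleys = number_valleys + 1
--     else:
--         number_hills = number_hills + 1
--
--     return number_hills + number_valleys
-- ===== SOURCE B (Python) =====
-- def solution(A):
--     # One forward pass: count direction changes among adjacent distinct values.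
--     if not A:
--         return 0
--     changes = 0
--     prev_dir = 0          # direction of the last strict step: +1 rise, -1 fall, 0 none yet
--     last = A[0]
--     for x in A[1:]:
--         if x != last:
--             d = 1 if x > last else -1
--             if prev_dir != 0 and d != prev_dir:
--                 changes += 1
--             prev_dir = d
--             last = x
--     return changes + 2 if prev_dir != 0 else 1
-- ===== Notes on version B (the rewrite author's own statement) =====
-- stated objective: faster
-- what changed: Replaces A's backward while-loop rescan over the preceding plateau at every strict step (and the final rescan) by a single forward pass that keeps the direction of the last strict step, counting direction changes plus two (one for a constant list).
import Mathlib
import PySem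

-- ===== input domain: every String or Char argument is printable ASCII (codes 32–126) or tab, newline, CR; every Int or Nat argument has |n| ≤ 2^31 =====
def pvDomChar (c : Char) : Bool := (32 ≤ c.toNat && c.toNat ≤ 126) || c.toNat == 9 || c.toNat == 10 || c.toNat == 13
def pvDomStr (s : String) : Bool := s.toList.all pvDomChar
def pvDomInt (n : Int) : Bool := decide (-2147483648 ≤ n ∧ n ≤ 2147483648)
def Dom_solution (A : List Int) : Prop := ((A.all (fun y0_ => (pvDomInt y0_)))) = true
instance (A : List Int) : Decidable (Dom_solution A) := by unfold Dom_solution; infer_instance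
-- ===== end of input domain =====

-- B replaces A's backward rescan over the preceding plateau at every strict step by a
-- single forward pass tracking the direction of the last strict step (measured faster).

-- ===== PORT A =====
-- xs[i]; inside Pre_ every index used is in range (-1 ≤ i < len on a non-empty list),
-- so the default of pyGetD is never returned
def pvGet (A : List Int) (i : Int) : Int := PySem.List.pyGetD A i 0

-- the 'while A[k] == A[k-1] and k > 0: k = k - 1' loop (structural recursion on k)
def pvBackK (A : List Int) : Nat → Nat
  | 0 => 0
  | k+1 => if pvGet A ((k : Int)+1) = pvGet A (k : Int) then pvBackK A k else k+1

-- body of A's 'for index in range(0, len(A))' loop; state = (number_hills, number_valleys)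
def pvStepA (A : List Int) (acc : Int × Int) (index : Int) : Int × Int :=
  if index = 0 then acc
  else
    let v := if pvGet A index > pvGet A (index-1) then
        let k := pvBackK A (index-1).toNat
        if k = 0 then acc.2 + 1
        else if pvGet A (k : Int) < pvGet A ((k : Int)-1) then acc.2 + 1 else acc.2
      else acc.2
    let h := if pvGet A index < pvGet A (index-1) then
        let k := pvBackK A (index-1).toNat
        if k = 0 then acc.1 + 1
        else if pvGet A (k : Int) > pvGet A ((k : Int)-1) then acc.1 + 1 else acc.1
      else acc.1
    (h, v)

def solution (A : List Int) : Int :=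
  if A.length = 0 then 0  -- Python raises NameError here ('index' is unbound); outside Pre_solution
  else
    let hv := (PySem.List.pyRange 0 A.length 1).foldl (pvStepA A) (0, 0)
    let j := pvBackK A (A.length - 1)
    let hv2 := if pvGet A (j : Int) < pvGet A ((j : Int)-1) then (hv.1, hv.2 + 1)
               else (hv.1 + 1, hv.2)
    hv2.1 + hv2.2

-- ===== PORT B =====
-- B's loop state: (changes, prev_dir, last)
def pvStepB (st : Int × Int × Int) (x : Int) : Int × Int × Int :=
  if x ≠ st.2.2 then
    let d : Int := if x > st.2.2 then 1 else -1
    (if st.2.1 ≠ 0 ∧ d ≠ st.2.1 then st.1 + 1 else st.1, d, x)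
  else st

def solution_alt (A : List Int) : Int :=
  match A with
  | [] => 0
  | a :: rest =>
    let st := rest.foldl pvStepB (0, 0, a)
    if st.2.1 ≠ 0 then st.1 + 2 else 1

-- ===== PRECONDITION & SPEC =====
-- Pre_ excludes only the empty list, on which A raises NameError ('index' is never bound).
def Pre_solution (A : List Int) : Prop := A ≠ []
instance (A : List Int) : Decidable (Pre_solution A) := by unfold Pre_solution; infer_instance
def pvWitness_solution : List Int := ([1, 2, 1] : List Int)

def Spec_solution (A : List Int) (out : Int) : Prop := out = solution_alt A
instance (A : List Int) (out : Int) : Decidable (Spec_solution A out) := by unfold Spec_solution; infer_instance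

-- ===== CLAIM (what is proved, stated in full; the proofs are below) =====
def Claim_equal_solution : Prop := ∀ (A : List Int), Dom_solution A → Pre_solution A → Spec_solution A (solution A)

-- ===== LEMMAS AND PROOFS =====

theorem pvGet_append (A : List Int) (x : Int) (i : Int) (h0 : 0 ≤ i) (h1 : i < A.length) :
    pvGet (A ++ [x]) i = pvGet A i := by
  unfold pvGet
  rw [PySem.List.pyGetD_eq_getElem (A ++ [x]) 0 h0 (by simp; omega),
      PySem.List.pyGetD_eq_getElem A 0 h0 h1]
  rw [List.getElem_append_left]

theorem pvGet_append_last (A : List Int) (x : Int) :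
    pvGet (A ++ [x]) (A.length : Int) = x := by
  unfold pvGet
  rw [PySem.List.pyGetD_eq_getElem (A ++ [x]) 0 (by positivity) (by simp)]
  simp

theorem pvBackK_le (A : List Int) (k : Nat) : pvBackK A k ≤ k := by
  induction k with
  | zero => simp [pvBackK]
  | succ k ih => simp only [pvBackK]; split_ifs with h <;> omega

theorem pvBackK_append (A : List Int) (x : Int) (k : Nat) (h : k < A.length) :
    pvBackK (A ++ [x]) k = pvBackK A k := by
  induction k with
  | zero => simp [pvBackK]
  | succ k ih =>
    simp only [pvBackK]
    rw [pvGet_append A x ((k : Int)+1) (by positivity) (by exact_mod_cast h),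
        pvGet_append A x (k : Int) (by positivity) (by exact_mod_cast (by omega : k < A.length))]
    split_ifs with hc
    · exact ih (by omega)
    · rfl

theorem pvBackK_spec (A : List Int) (k : Nat) :
    pvBackK A k = 0 ∨ pvGet A (pvBackK A k : Int) ≠ pvGet A ((pvBackK A k : Int) - 1) := by
  induction k with
  | zero => left; rfl
  | succ k ih =>
    simp only [pvBackK]
    split_ifs with hc
    · exact ih
    · right; push_cast; simpa using hc

theorem pvStepA_append (A : List Int) (x : Int) (acc : Int × Int) (i : Int)
    (h0 : 0 ≤ i) (h1 : i < A.length) :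
    pvStepA (A ++ [x]) acc i = pvStepA A acc i := by
  unfold pvStepA
  by_cases hi : i = 0
  · simp [hi]
  · have h0' : 1 ≤ i := by omega
    have htn : (((i-1).toNat : Int)) = i - 1 := Int.toNat_of_nonneg (by omega)
    have hg1 : pvGet (A++[x]) i = pvGet A i := pvGet_append _ _ _ h0 h1
    have hg2 : pvGet (A++[x]) (i-1) = pvGet A (i-1) := pvGet_append _ _ _ (by omega) (by omega)
    have hk : pvBackK (A++[x]) (i-1).toNat = pvBackK A (i-1).toNat :=
      pvBackK_append _ _ _ (by omega)
    have hkle : pvBackK A (i-1).toNat ≤ (i-1).toNat := pvBackK_le _ _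
    simp only [if_neg hi]
    rw [hg1, hg2, hk]
    by_cases hk0 : pvBackK A (i-1).toNat = 0
    · rw [hk0]; simp
    · have hkl : (pvBackK A (i-1).toNat : Int) < A.length := by omega
      have e1 : pvGet (A++[x]) (pvBackK A (i-1).toNat : Int) = pvGet A (pvBackK A (i-1).toNat : Int) :=
        pvGet_append _ _ _ (by positivity) hkl
      have e2 : pvGet (A++[x]) ((pvBackK A (i-1).toNat : Int) - 1) = pvGet A ((pvBackK A (i-1).toNat : Int) - 1) :=
        pvGet_append _ _ _ (by omega) (by omega)
      rw [e1, e2]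

theorem pvFoldA_append (A : List Int) (x : Int) (l : List Int) (acc : Int × Int)
    (h : ∀ i ∈ l, 0 ≤ i ∧ i < A.length) :
    l.foldl (pvStepA (A ++ [x])) acc = l.foldl (pvStepA A) acc := by
  induction l generalizing acc with
  | nil => rfl
  | cons i l ih =>
    simp only [List.foldl_cons]
    rw [pvStepA_append A x acc i (h i (by simp)).1 (h i (by simp)).2]
    exact ih _ (fun j hj => h j (by simp [hj]))

def pvB (a : Int) (rest : List Int) : Int × Int × Int := rest.foldl pvStepB (0, 0, a)
def pvA (A : List Int) : Int × Int :=
  (PySem.List.pyRange 0 A.length 1).foldl (pvStepA A) (0, 0)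
def pvJ (A : List Int) : Nat := pvBackK A (A.length - 1)

theorem pvA_append (A : List Int) (x : Int) :
    pvA (A ++ [x]) = pvStepA (A ++ [x]) (pvA A) (A.length : Int) := by
  rw [pvA]
  have hL : (((A ++ [x]).length : Nat) : Int) = (A.length : Int) + 1 := by simp
  rw [hL, PySem.List.pyRange_one_succ_right (by positivity),
      List.foldl_append, List.foldl_cons, List.foldl_nil]
  rw [pvFoldA_append A x _ _ (fun i hi => by
        rw [PySem.List.mem_pyRange_one] at hi; exact ⟨hi.1, hi.2⟩)]
  rfl

set_option maxHeartbeats 1000000 in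
theorem pvInv (a : Int) (rest : List Int) :
    (pvB a rest).2.2 = pvGet (a :: rest) (rest.length : Int)
    ∧ (pvA (a :: rest)).1 + (pvA (a :: rest)).2
        = (pvB a rest).1 + (if (pvB a rest).2.1 = 0 then 0 else 1)
    ∧ ((pvB a rest).2.1 = 0 → (pvB a rest).1 = 0 ∧ pvJ (a :: rest) = 0)
    ∧ (pvJ (a :: rest) ≠ 0 →
        ((pvB a rest).2.1 = 1 ↔ pvGet (a :: rest) (pvJ (a :: rest) : Int) > pvGet (a :: rest) ((pvJ (a :: rest) : Int) - 1))
        ∧ ((pvB a rest).2.1 = -1 ↔ pvGet (a :: rest) (pvJ (a :: rest) : Int) < pvGet (a :: rest) ((pvJ (a :: rest) : Int) - 1)))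
    ∧ (pvJ (a :: rest) = 0 → (pvB a rest).2.1 = 0)
    ∧ ((pvB a rest).2.1 = 0 ∨ (pvB a rest).2.1 = 1 ∨ (pvB a rest).2.1 = -1) := by
  induction rest using List.reverseRecOn with
  | nil =>
      have hr : PySem.List.pyRange 0 (1 : Int) 1 = [0] := by decide
      refine ⟨?_, ?_, ?_, ?_, ?_, ?_⟩ <;>
        norm_num [pvB, pvA, pvJ, pvBackK, pvStepA, pvGet, hr,
          PySem.List.pyGetD_zero_cons]
  | append_singleton ys x ih =>
      obtain ⟨ha, hb, hc, hd, he, hf⟩ := ih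
      have hcons : a :: (ys ++ [x]) = (a :: ys) ++ [x] := by simp
      set A : List Int := a :: ys with hAdef
      set m : Nat := ys.length with hm
      have hAlen : A.length = m + 1 := by simp [hAdef, hm]
      have hB : pvB a (ys ++ [x]) = pvStepB (pvB a ys) x := by
        simp [pvB, List.foldl_append]
      have hgx : pvGet (A ++ [x]) ((m : Int) + 1) = x := by
        have h1 := pvGet_append_last A x
        rw [hAlen] at h1; push_cast at h1; exact h1
      have hgm : pvGet (A ++ [x]) (m : Int) = pvGet A (m : Int) :=
        pvGet_append _ _ _ (by positivity) (by rw [hAlen]; push_cast; omega)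
      have hJA : pvJ A = pvBackK A m := by rw [pvJ, hAlen]; simp only [Nat.add_sub_cancel]
      have hjle : pvJ A ≤ m := by rw [hJA]; exact pvBackK_le A m
      have hJ : pvJ (A ++ [x]) = if x = pvGet A (m : Int) then pvJ A else m + 1 := by
        have hl : (A ++ [x]).length - 1 = m + 1 := by simp [hAlen]
        rw [pvJ, hl]
        simp only [pvBackK, hgx, hgm]
        split_ifs with hc1
        · simpa [Nat.add_sub_cancel, hJA] using pvBackK_append A x m (by omega)
        · omega
      have hlenx : ((ys ++ [x]).length : Int) = (m : Int) + 1 := by simp [hm]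
      have hgj : pvJ A ≠ 0 →
          pvGet (A ++ [x]) (pvJ A : Int) = pvGet A (pvJ A : Int)
          ∧ pvGet (A ++ [x]) ((pvJ A : Int) - 1) = pvGet A ((pvJ A : Int) - 1) := by
        intro hj0
        constructor
        · exact pvGet_append _ _ _ (by positivity) (by rw [hAlen]; push_cast; omega)
        · exact pvGet_append _ _ _ (by omega) (by rw [hAlen]; push_cast; omega)
      have hA1 : pvA (A ++ [x]) = pvStepA (A ++ [x]) (pvA A) (A.length : Int) :=
        pvA_append A x
      have hidx0 : ¬ ((A.length : Int) = 0) := by rw [hAlen]; push_cast; omega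
      have e1 : pvGet (A ++ [x]) (A.length : Int) = x := pvGet_append_last A x
      have e2 : pvGet (A ++ [x]) ((A.length : Int) - 1) = pvGet A (m : Int) := by
        have h2 : ((A.length : Int) - 1) = (m : Int) := by rw [hAlen]; push_cast; ring
        rw [h2, hgm]
      have hktn : ((A.length : Int) - 1).toNat = m := by rw [hAlen]; push_cast; omega
      have hkval : pvBackK (A ++ [x]) ((A.length : Int) - 1).toNat = pvJ A := by
        rw [hktn, pvBackK_append A x m (by omega), hJA]
      rw [hcons] at *
      by_cases hx : x = pvGet A (m : Int)
      · -- appended element equals the last one: everything is unchanged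
        have hstB : pvStepB (pvB a ys) x = pvB a ys := by
          rw [pvStepB, if_neg (by rw [ha]; exact not_not_intro hx)]
        have hstepAeq : pvStepA (A ++ [x]) (pvA A) (A.length : Int) = pvA A := by
          rw [pvStepA, if_neg hidx0]
          simp only [e1, e2]
          rw [hx]
          simp
        have hA2 : pvA (A ++ [x]) = pvA A := by rw [hA1, hstepAeq]
        have hJ2 : pvJ (A ++ [x]) = pvJ A := by rw [hJ, if_pos hx]
        refine ⟨?_, ?_, ?_, ?_, ?_, ?_⟩
        · rw [hB, hstB, hlenx, hgx, ha]; exact hx.symm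
        · rw [hB, hstB, hA2]; exact hb
        · rw [hB, hstB, hJ2]; exact hc
        · rw [hB, hstB, hJ2]
          intro hj0
          obtain ⟨g1, g2⟩ := hgj hj0
          rw [g1, g2]
          exact hd hj0
        · rw [hB, hstB, hJ2]; exact he
        · rw [hB, hstB]; exact hf
      · -- a strict step is appended
        have hxne : x ≠ (pvB a ys).2.2 := by rw [ha]; exact hx
        have hstB : pvStepB (pvB a ys) x =
            ((if (pvB a ys).2.1 ≠ 0 ∧ (if x > pvGet A (m : Int) then (1:Int) else -1) ≠ (pvB a ys).2.1
               then (pvB a ys).1 + 1 else (pvB a ys).1),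
             (if x > pvGet A (m : Int) then (1:Int) else -1), x) := by
          rw [pvStepB, if_pos hxne, ha]
        have hB1 : (pvB a (ys ++ [x])).1 =
            (if (pvB a ys).2.1 ≠ 0 ∧ (if x > pvGet A (m : Int) then (1:Int) else -1) ≠ (pvB a ys).2.1
              then (pvB a ys).1 + 1 else (pvB a ys).1) := by rw [hB, hstB]
        have hB2 : (pvB a (ys ++ [x])).2.1 = (if x > pvGet A (m : Int) then (1:Int) else -1) := by
          rw [hB, hstB]
        have hB3 : (pvB a (ys ++ [x])).2.2 = x := by rw [hB, hstB]
        have hJ2 : pvJ (A ++ [x]) = m + 1 := by rw [hJ, if_neg hx]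
        have hstepA : pvStepA (A ++ [x]) (pvA A) (A.length : Int) =
            ((if pvGet A (m : Int) > x then
                (if pvJ A = 0 then (pvA A).1 + 1
                 else if pvGet A (pvJ A : Int) > pvGet A ((pvJ A : Int) - 1) then (pvA A).1 + 1 else (pvA A).1)
              else (pvA A).1),
             (if x > pvGet A (m : Int) then
                (if pvJ A = 0 then (pvA A).2 + 1
                 else if pvGet A (pvJ A : Int) < pvGet A ((pvJ A : Int) - 1) then (pvA A).2 + 1 else (pvA A).2)
              else (pvA A).2)) := by
          rw [pvStepA, if_neg hidx0]
          simp only [e1, e2, hkval]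
          by_cases hj0 : pvJ A = 0
          · simp [hj0]
          · obtain ⟨g1, g2⟩ := hgj hj0
            simp only [if_neg hj0, g1, g2]
        have hA1' : (pvA (A ++ [x])).1 =
            (if pvGet A (m : Int) > x then
                (if pvJ A = 0 then (pvA A).1 + 1
                 else if pvGet A (pvJ A : Int) > pvGet A ((pvJ A : Int) - 1) then (pvA A).1 + 1 else (pvA A).1)
              else (pvA A).1) := by rw [hA1, hstepA]
        have hA2' : (pvA (A ++ [x])).2 =
            (if x > pvGet A (m : Int) then
                (if pvJ A = 0 then (pvA A).2 + 1
                 else if pvGet A (pvJ A : Int) < pvGet A ((pvJ A : Int) - 1) then (pvA A).2 + 1 else (pvA A).2)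
              else (pvA A).2) := by rw [hA1, hstepA]
        have hxL : x ≠ pvGet A (m : Int) := hx
        refine ⟨?_, ?_, ?_, ?_, ?_, ?_⟩
        · rw [hB3, hlenx, hgx]
        · rw [hA1', hA2', hB1, hB2]
          by_cases hj0 : pvJ A = 0
          · have hpd := he hj0
            have hc0 := (hc hpd).1
            rw [hpd] at hb
            norm_num at hb
            simp only [hj0, hpd]
            split_ifs <;> first | omega | exact False.elim (by assumption)
          · have hpd : ¬ ((pvB a ys).2.1 = 0) := fun h => hj0 (hc h).2
            obtain ⟨hiff1, hiff2⟩ := hd hj0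
            have hspec : pvGet A (pvJ A : Int) ≠ pvGet A ((pvJ A : Int) - 1) := by
              have hsp := pvBackK_spec A m
              rw [← hJA] at hsp
              exact hsp.resolve_left hj0
            rw [if_neg hpd] at hb
            simp only [if_neg hj0]
            rcases hf with h0 | h1 | hm1
            · exact absurd h0 hpd
            · have hgt : pvGet A (pvJ A : Int) > pvGet A ((pvJ A : Int) - 1) := hiff1.mp h1
              have hnlt : ¬ (pvGet A (pvJ A : Int) < pvGet A ((pvJ A : Int) - 1)) := by omega
              simp only [h1]
              split_ifs <;> first | omega | exact False.elim (by assumption)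
            · have hlt : pvGet A (pvJ A : Int) < pvGet A ((pvJ A : Int) - 1) := hiff2.mp hm1
              have hngt : ¬ (pvGet A (pvJ A : Int) > pvGet A ((pvJ A : Int) - 1)) := by omega
              simp only [hm1]
              split_ifs <;> first | omega | exact False.elim (by assumption)
        · rw [hB2]
          intro h0
          exfalso
          split_ifs at h0
          omega
        · rw [hB2, hJ2]
          intro _
          have c1 : (((m + 1 : Nat)) : Int) = (m : Int) + 1 := by push_cast; ring
          rw [c1, hgx]
          have c2 : ((m : Int) + 1 - 1) = (m : Int) := by ring
          rw [c2, hgm]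
          constructor <;> constructor <;> intro hh <;> split_ifs at hh ⊢ <;> omega
        · rw [hJ2]
          intro h0
          exact absurd h0 (Nat.succ_ne_zero m)
        · rw [hB2]
          split_ifs <;> simp


theorem ite_sum (c : Prop) [Decidable c] (p : Int × Int) :
    (if c then (p.1, p.2 + 1) else (p.1 + 1, p.2)).1
      + (if c then (p.1, p.2 + 1) else (p.1 + 1, p.2)).2 = p.1 + p.2 + 1 := by
  split_ifs <;> dsimp only <;> ring

theorem solution_eq (a : Int) (rest : List Int) :
    solution (a :: rest) = (pvA (a :: rest)).1 + (pvA (a :: rest)).2 + 1 := by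
  rw [solution, if_neg (by simp : ¬((a :: rest).length = 0))]
  exact ite_sum _ (pvA (a :: rest))

-- ===== VERDICT (by name: the statement is the Claim_ definition above) =====
theorem solution_spec : Claim_equal_solution := by
  unfold Claim_equal_solution
  intro A _ hpre
  unfold Spec_solution
  cases A with
  | nil => exact absurd rfl hpre
  | cons a rest =>
    obtain ⟨ha, hb, hc, hd, he, hf⟩ := pvInv a rest
    have halt : solution_alt (a :: rest)
        = if (pvB a rest).2.1 ≠ 0 then (pvB a rest).1 + 2 else 1 := rfl
    rw [solution_eq, halt]
    by_cases hpd : (pvB a rest).2.1 = 0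
    · rw [if_neg (by simpa using hpd)]
      have hc0 := (hc hpd).1
      rw [hpd] at hb
      norm_num at hb
      omega
    · rw [if_pos hpd]
      rw [if_neg hpd] at hb
      omega
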